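-- pv_equiv track=rewrite | github.com/Reroutnig/CS4990_Wildfire_Spread | wgan_wildfire/test_wildfire_gan.py | find_consecutive_days
-- ===== SOURCE A (Python) =====
-- def find_consecutive_days(burn_day_files, history_days=3):
--     """
--     Find sequences of days where we have current day and required history days
--     """
--     valid_days = []
--     all_days = sorted(burn_day_files.keys())
--
--     for day in all_days:
--         # Check if we have all required history days
--         history_needed = [day - i - 1 for i in range(history_days)]
--         if all(d in burn_day_files for d in history_needed):
--             valid_days.append(day)
--
--     return valid_days
-- ===== SOURCE B (Python) =====
-- def find_consecutive_days(burn_day_files, history_days=3):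
--     s = set(burn_day_files.keys())
--     result = s
--     for _ in range(history_days):
--         if not result:
--             break
--         result = s & {x + 1 for x in result}
--     return sorted(result)
-- ===== Notes on version B (the rewrite author's own statement) =====
-- stated objective: faster
-- what changed: Replaces the per-day loop probing each of the history_days predecessors in the dict by whole-set algebra: repeatedly intersect the key set with the shifted surviving set, breaking as soon as it empties (at most longest-run-length iterations instead of history_days work per day), and sort once at the end.
import Mathlib
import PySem

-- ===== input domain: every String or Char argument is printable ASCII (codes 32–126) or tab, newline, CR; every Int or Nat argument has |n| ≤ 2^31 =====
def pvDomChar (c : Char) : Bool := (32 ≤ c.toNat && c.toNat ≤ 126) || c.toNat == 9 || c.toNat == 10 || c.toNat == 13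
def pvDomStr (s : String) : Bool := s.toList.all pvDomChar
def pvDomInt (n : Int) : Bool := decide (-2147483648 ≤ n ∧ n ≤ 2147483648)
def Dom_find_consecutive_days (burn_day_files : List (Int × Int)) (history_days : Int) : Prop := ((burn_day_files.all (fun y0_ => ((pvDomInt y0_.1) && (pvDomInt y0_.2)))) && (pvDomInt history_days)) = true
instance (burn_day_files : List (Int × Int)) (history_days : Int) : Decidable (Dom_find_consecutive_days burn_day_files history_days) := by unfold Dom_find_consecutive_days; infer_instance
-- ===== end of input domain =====

-- B computes the same valid-day list by set algebra — repeatedly intersecting the key set with the shifted surviving set, breaking when it empties — instead of per-day membership probes; alternative decomposition.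


-- ===== PORT A =====
def find_consecutive_days (burn_day_files : List (Int × Int)) (history_days : Int) : List Int :=
  let all_days := PySem.List.sorted (PySem.Dict.keys (PySem.Dict.mk burn_day_files)) (fun x => x) false
  all_days.foldl (fun valid_days day =>
    let history_needed := (PySem.List.pyRange 0 history_days 1).map (fun i => day - i - 1)
    if history_needed.all (fun d => PySem.Dict.contains (PySem.Dict.mk burn_day_files) d) then valid_days ++ [day]
    else valid_days) []

-- ===== PORT B =====
-- the 'for _ in range(history_days): if not result: break; result = s & {x+1 for x in result}' loop
def fcdLoop (s : List Int) : Nat → List Int → List Int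
  | 0, result => result
  | n + 1, result =>
    if result = [] then result   -- break
    else fcdLoop s n (PySem.Set.inter s (PySem.Set.ofList (result.map (fun x => x + 1))))

def find_consecutive_days_alt (burn_day_files : List (Int × Int)) (history_days : Int) : List Int :=
  let s := PySem.Set.ofList (PySem.Dict.keys (PySem.Dict.mk burn_day_files))
  let result := fcdLoop s (PySem.List.pyRange 0 history_days 1).length s
  PySem.List.sorted result (fun x => x) false

-- ===== PRECONDITION & SPEC =====
-- Pre_ states the Python dict invariant: a dict cannot carry duplicate keys, so this excludes
-- no input the Python function can actually receive (on a raw duplicate-key list A would keep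
-- duplicates while B's set would not).
def Pre_find_consecutive_days (burn_day_files : List (Int × Int)) (history_days : Int) : Prop :=
  (burn_day_files.map Prod.fst).Nodup
instance (burn_day_files : List (Int × Int)) (history_days : Int) : Decidable (Pre_find_consecutive_days burn_day_files history_days) := by unfold Pre_find_consecutive_days; infer_instance
def pvWitness_find_consecutive_days : (List (Int × Int)) × Int := ([(1, 10), (2, 20), (3, 30)], 2)

def Spec_find_consecutive_days (burn_day_files : List (Int × Int)) (history_days : Int) (out : List Int) : Prop := out = find_consecutive_days_alt burn_day_files history_days
instance (burn_day_files : List (Int × Int)) (history_days : Int) (out : List Int) : Decidable (Spec_find_consecutive_days burn_day_files history_days out) := by unfold Spec_find_consecutive_days; infer_instance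

-- ===== CLAIM (what is proved, stated in full; the proofs are below) =====
def Claim_equal_find_consecutive_days : Prop := ∀ (burn_day_files : List (Int × Int)) (history_days : Int), Dom_find_consecutive_days burn_day_files history_days → Pre_find_consecutive_days burn_day_files history_days → Spec_find_consecutive_days burn_day_files history_days (find_consecutive_days burn_day_files history_days)

-- ===== LEMMAS AND PROOFS =====

-- loop invariant: after n more iterations starting from a set r that holds exactly the days with
-- their first k predecessors present, the loop holds exactly the days with their first k+n present
theorem mem_fcdLoop (s : List Int) :
    ∀ (n : Nat) (k : Nat) (r : List Int),
      (∀ x : Int, x ∈ r ↔ (x ∈ s ∧ ∀ j : Nat, 1 ≤ j → j ≤ k → x - j ∈ s)) →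
      ∀ x : Int, x ∈ fcdLoop s n r ↔ (x ∈ s ∧ ∀ j : Nat, 1 ≤ j → j ≤ k + n → x - j ∈ s) := by
  intro n
  induction n with
  | zero => intro k r hr x; simpa using hr x
  | succ n ih =>
    intro k r hr x
    rw [fcdLoop]
    by_cases hre : r = []
    · rw [if_pos hre, hre]
      simp only [List.not_mem_nil, false_iff]
      rintro ⟨hxs, hall⟩
      -- then x - 1 would satisfy r's invariant, contradicting r = []
      have : (x - 1) ∈ r := by
        rw [hr]
        refine ⟨by simpa using hall 1 le_rfl (by omega), ?_⟩
        intro j h1 hk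
        have := hall (j + 1) (by omega) (by omega)
        push_cast at this
        have he : x - ((j : Int) + 1) = x - 1 - (j : Int) := by ring
        rwa [he] at this
      simp [hre] at this
    · rw [if_neg hre, show k + (n + 1) = (k + 1) + n from by omega]
      apply ih (k + 1)
      intro y
      rw [PySem.Set.mem_inter, PySem.Set.mem_ofList, List.mem_map]
      constructor
      · rintro ⟨hys, ⟨z, hz, hzy⟩⟩
        refine ⟨hys, ?_⟩
        intro j h1 hk
        rcases (hr z).mp hz with ⟨hzs, hall⟩
        rcases Nat.eq_or_lt_of_le h1 with h | h
        · have : y - (j : Int) = z := by omega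
          rw [this]; exact hzs
        · have := hall (j - 1) (by omega) (by omega)
          have he : z - (↑(j - 1) : Int) = y - ↑j := by
            have : ((j - 1 : Nat) : Int) = (j : Int) - 1 := by omega
            rw [this]; omega
          rwa [he] at this
      · rintro ⟨hys, hall⟩
        refine ⟨hys, ⟨y - 1, ?_, by ring⟩⟩
        rw [hr]
        refine ⟨by simpa using hall 1 le_rfl (by omega), ?_⟩
        intro j h1 hk
        have := hall (j + 1) (by omega) (by omega)
        push_cast at this
        have he : y - ((j : Int) + 1) = y - 1 - (j : Int) := by ring
        rwa [he] at this

-- the loop preserves Nodup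
theorem nodup_fcdLoop (s : List Int) (hs : s.Nodup) :
    ∀ (n : Nat) (r : List Int), r.Nodup → (fcdLoop s n r).Nodup := by
  intro n
  induction n with
  | zero => intro r h; simpa [fcdLoop] using h
  | succ n ih =>
    intro r h
    rw [fcdLoop]
    split
    · exact h
    · exact ih _ (PySem.Set.nodup_inter _ _ hs)

-- ===== VERDICT (by name: the statement is the Claim_ definition above) =====
theorem find_consecutive_days_spec : Claim_equal_find_consecutive_days := by
  intro burn_day_files history_days _hdom hpre
  unfold Spec_find_consecutive_days find_consecutive_days find_consecutive_days_alt
  set K := PySem.Dict.keys (PySem.Dict.mk burn_day_files) with hK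
  have hKnodup : K.Nodup := by
    simpa [hK, PySem.Dict.keys_mk] using hpre
  set p : Int → Bool := fun day =>
    ((PySem.List.pyRange 0 history_days 1).map (fun i => day - i - 1)).all
      (fun d => PySem.Dict.contains (PySem.Dict.mk burn_day_files) d) with hp
  -- A's loop is a filter over the sorted keys
  rw [PySem.List.foldl_append_if_eq_filter p]
  rw [List.nil_append]
  set sortedK := PySem.List.sorted K (fun x => x) false with hsk
  have hsknodup : sortedK.Nodup := (PySem.List.sorted_perm K (fun x => x) false).nodup_iff.mpr hKnodup
  -- p characterised as predecessor membership in K, indexed by Nat offsets 1..len(range)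
  have hlen : ((PySem.List.pyRange 0 history_days 1).length : Int) = max history_days 0 := by
    rw [PySem.List.length_pyRange_one]; omega
  have hpmem : ∀ x : Int, p x = true ↔
      ∀ j : Nat, 1 ≤ j → j ≤ (PySem.List.pyRange 0 history_days 1).length → x - j ∈ K := by
    intro x
    simp only [hp, List.all_eq_true, List.mem_map]
    constructor
    · intro h j h1 hj
      have hmem : ((j : Int) - 1) ∈ PySem.List.pyRange 0 history_days 1 := by
        rw [PySem.List.mem_pyRange_one]; omega
      have := h (x - ((j : Int) - 1) - 1) ⟨(j : Int) - 1, hmem, rfl⟩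
      have hm := (PySem.Dict.contains_iff_mem_keys _ _).mp this
      have he : x - ((j : Int) - 1) - 1 = x - j := by ring
      rwa [he] at hm
    · rintro h d ⟨i, hi, rfl⟩
      apply (PySem.Dict.contains_iff_mem_keys _ _).mpr
      rw [PySem.List.mem_pyRange_one] at hi
      have := h (i + 1).toNat (by omega) (by omega)
      have he : x - (((i + 1).toNat : Nat) : Int) = x - i - 1 := by omega
      rwa [he] at this
  -- the two sides are permutations of each other
  have hperm : (sortedK.filter p).Perm
      (fcdLoop (PySem.Set.ofList K) (PySem.List.pyRange 0 history_days 1).length (PySem.Set.ofList K)) := by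
    apply (List.perm_ext_iff_of_nodup (hsknodup.filter p)
      (nodup_fcdLoop _ (PySem.Set.nodup_ofList K) _ _ (PySem.Set.nodup_ofList K))).mpr
    intro x
    rw [mem_fcdLoop (PySem.Set.ofList K) _ 0 _ (fun y => by simp [PySem.Set.mem_ofList]; omega)]
    simp only [List.mem_filter, PySem.Set.mem_ofList, hsk, PySem.List.mem_sorted, hpmem,
      Nat.zero_add]
  -- both sides strictly increasing / sorted: equality
  have hlt : (sortedK.filter p).Pairwise (fun a b => a < b) := by
    have hle : sortedK.Pairwise (fun a b => a ≤ b) := by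
      simpa using PySem.List.sorted_pairwise K (fun x => x)
    have : sortedK.Pairwise (fun a b => a < b) := by
      have := hle.and hsknodup
      exact this.imp (fun {a b} h => lt_of_le_of_ne h.1 h.2)
    exact this.filter p
  exact (PySem.List.sorted_eq_of_perm_of_pairwise_lt _ _ _ hperm hlt).symm
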